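-- pv_equiv track=rewrite | github.com/aws-samples/aws-smart-product-onboarding | notebooks/configure_categorization.py | get_child_category_ids
-- ===== SOURCE A (Python) =====
-- from typing import Dict, List, Set, Any, Tuple
--
-- def get_child_category_ids(cat_ids: List[str], category_tree: Dict) -> List[str]:
--     """Get all child category IDs recursively"""
--     categories = []
--     for cat_id in cat_ids:
--         if not category_tree[cat_id]["childs"]:
--             categories.append(cat_id)
--         else:
--             categories.extend(
--                 get_child_category_ids(
--                     [child["id"] for child in category_tree[cat_id]["childs"]],
--                     category_tree,
--                 )
--             )
--     return categories
-- ===== SOURCE B (Python) =====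
-- def get_child_category_ids(cat_ids, category_tree):
--     """Get all child category IDs: iterative DFS with an explicit stack
--     instead of recursion (same pre-order leaf list, same KeyErrors)."""
--     result = []
--     stack = list(reversed(cat_ids))
--     while stack:
--         cat_id = stack.pop()
--         childs = category_tree[cat_id]["childs"]
--         if not childs:
--             result.append(cat_id)
--         else:
--             stack.extend(reversed([child["id"] for child in childs]))
--     return result
-- ===== Notes on version B (the rewrite author's own statement) =====
-- stated objective: alternative
-- what changed: The tree recursion is replaced by an iterative depth-first traversal over an explicit stack (children pushed in reverse so the pre-order leaf list is identical); no recursive calls or per-level intermediate lists remain.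
import Mathlib
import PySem

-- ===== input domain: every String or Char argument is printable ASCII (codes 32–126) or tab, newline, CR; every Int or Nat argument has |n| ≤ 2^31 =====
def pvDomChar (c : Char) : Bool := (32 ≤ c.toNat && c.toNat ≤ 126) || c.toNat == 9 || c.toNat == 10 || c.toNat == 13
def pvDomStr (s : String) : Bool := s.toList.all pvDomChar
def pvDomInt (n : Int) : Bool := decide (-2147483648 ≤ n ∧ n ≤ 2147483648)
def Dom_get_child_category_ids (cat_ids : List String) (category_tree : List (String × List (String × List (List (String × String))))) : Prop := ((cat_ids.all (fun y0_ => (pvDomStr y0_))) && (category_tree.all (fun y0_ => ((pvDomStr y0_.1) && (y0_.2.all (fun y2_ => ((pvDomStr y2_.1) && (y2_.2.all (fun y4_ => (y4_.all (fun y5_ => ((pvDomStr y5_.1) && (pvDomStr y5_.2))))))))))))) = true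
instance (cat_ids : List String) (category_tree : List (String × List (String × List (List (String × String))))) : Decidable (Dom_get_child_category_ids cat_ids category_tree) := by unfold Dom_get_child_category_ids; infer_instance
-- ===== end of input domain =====

-- B replaces A's tree recursion by an iterative DFS over an explicit stack (same pre-order
-- leaf list); objective: alternative decomposition, no speed claim. Both Lean ports use a
-- fuel counter only to make Python's possibly non-terminating/raising recursion total;
-- Pre_ guarantees the fuel is never exhausted.

-- Python dict lookup on an association list: first match (a real dict has unique keys).
def pvLook {α : Type} : List (String × α) → String → Option α
  | [], _ => none
  | (k', v) :: rest, k => if k' = k then some v else pvLook rest k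

-- [child["id"] for child in cs] : none = KeyError at the first child without "id".
def pvIds : List (List (String × String)) → Option (List String)
  | [] => some []
  | c :: cs =>
    match pvLook c "id" with
    | none => none
    | some cid => (pvIds cs).map (cid :: ·)

-- ===== PORT A =====
-- literal port of A's recursion; none = KeyError/unbounded recursion (excluded by Pre_).
def pvGoA (t : List (String × List (String × List (List (String × String))))) :
    Nat → List String → Option (List String)
  | _, [] => some []
  | fuel, x :: rest =>
    match pvLook t x with
    | none => none
    | some v =>
      match pvLook v "childs" with
      | none => none
      | some cs =>
        if cs = [] then (pvGoA t fuel rest).map (x :: ·)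
        else
          match pvIds cs with
          | none => none
          | some cids =>
            match fuel with
            | 0 => none
            | fuel' + 1 =>
              (pvGoA t fuel' cids).bind (fun l1 => (pvGoA t (fuel' + 1) rest).map (l1 ++ ·))
  termination_by fuel xs => (fuel, xs.length)

def get_child_category_ids (cat_ids : List String) (category_tree : List (String × List (String × List (List (String × String))))) : List String :=
  (pvGoA category_tree category_tree.length cat_ids).getD []

-- ===== PORT B =====
-- stack-machine DFS; the Lean stack list keeps Python's stack in reversed (top-first) order,
-- so stack = list(reversed(cat_ids)) is the list cat_ids and stack.extend(reversed(ids))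
-- is ids ++ rest.  One fuel unit per loop iteration.
def pvGoB (t : List (String × List (String × List (List (String × String))))) :
    Nat → List String → List String → Option (List String)
  | 0, _, _ => none
  | _ + 1, [], acc => some acc
  | fuel + 1, x :: rest, acc =>
    match pvLook t x with
    | none => none
    | some v =>
      match pvLook v "childs" with
      | none => none
      | some cs =>
        if cs = [] then pvGoB t fuel rest (acc ++ [x])
        else
          match pvIds cs with
          | none => none
          | some cids => pvGoB t fuel (cids ++ rest) acc

-- total child count of the tree: each node's branching is ≤ pvW, so
-- (pvW+1)^(depth+1) pops bound the whole traversal (proved below).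
def pvW (t : List (String × List (String × List (List (String × String))))) : Nat :=
  (t.map (fun e => ((pvLook e.2 "childs").getD []).length)).sum

def get_child_category_ids_alt (cat_ids : List String) (category_tree : List (String × List (String × List (List (String × String))))) : List String :=
  (pvGoB category_tree
    (cat_ids.length * (pvW category_tree + 1) ^ (category_tree.length + 1) + 1)
    cat_ids []).getD []

-- ===== PRECONDITION & SPEC =====
-- pvOk t d k: starting from id k, the recursion resolves completely within depth d
-- (k's entry exists, has a "childs" list, each child has an "id", and each child id
-- resolves within depth d-1).  Stated with the library's List.lookup, not the ports.
def pvOk (t : List (String × List (String × List (List (String × String))))) :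
    Nat → String → Bool
  | 0, _ => false
  | d + 1, k =>
    match List.lookup k t with
    | none => false
    | some v =>
      match List.lookup "childs" v with
      | none => false
      | some cs =>
        cs.all (fun c => (List.lookup "id" c).isSome &&
          pvOk t d ((List.lookup "id" c).getD ""))

-- Pre_ excludes exactly the inputs on which the Python A raises: a missing category,
-- "childs" or "id" key (KeyError), or a reachable cycle (RecursionError).  On any input
-- where A returns, every recursion path visits pairwise distinct keys, so its depth is at
-- most the number of tree entries, and pvOk with fuel |category_tree| holds.
def Pre_get_child_category_ids (cat_ids : List String) (category_tree : List (String × List (String × List (List (String × String))))) : Prop :=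
  ∀ x ∈ cat_ids, pvOk category_tree category_tree.length x = true

instance (cat_ids : List String) (category_tree : List (String × List (String × List (List (String × String))))) : Decidable (Pre_get_child_category_ids cat_ids category_tree) := by
  unfold Pre_get_child_category_ids; infer_instance

def pvWitness_get_child_category_ids : List String × (List (String × List (String × List (List (String × String))))) :=
  (["r", "x"], [("x", [("childs", [])]),
                ("r", [("childs", [[("id", "x")], [("id", "y")]])]),
                ("y", [("childs", [])])])

def Spec_get_child_category_ids (cat_ids : List String) (category_tree : List (String × List (String × List (List (String × String))))) (out : List String) : Prop := out = get_child_category_ids_alt cat_ids category_tree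
instance (cat_ids : List String) (category_tree : List (String × List (String × List (List (String × String))))) (out : List String) : Decidable (Spec_get_child_category_ids cat_ids category_tree out) := by unfold Spec_get_child_category_ids; infer_instance

-- ===== CLAIM (what is proved, stated in full; the proofs are below) =====
def Claim_equal_get_child_category_ids : Prop := ∀ (cat_ids : List String) (category_tree : List (String × List (String × List (List (String × String))))), Dom_get_child_category_ids cat_ids category_tree → Pre_get_child_category_ids cat_ids category_tree → Spec_get_child_category_ids cat_ids category_tree (get_child_category_ids cat_ids category_tree)

-- ===== LEMMAS AND PROOFS =====


-- the common specification both ports are proved to compute: the pre-order leaf list,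
-- defined by recursion on a depth bound.
def pvLeaves (t : List (String × List (String × List (List (String × String))))) :
    Nat → String → List String
  | 0, _ => []
  | d + 1, k =>
    match pvLook t k with
    | none => []
    | some v =>
      match pvLook v "childs" with
      | none => []
      | some cs =>
        if cs = [] then [k]
        else
          match pvIds cs with
          | none => []
          | some cids => cids.flatMap (fun cid => pvLeaves t d cid)

theorem pvLook_eq_lookup {α : Type} (l : List (String × α)) (k : String) :
    pvLook l k = List.lookup k l := by
  induction l with
  | nil => rfl
  | cons e rest ih =>
    obtain ⟨k', v⟩ := e
    by_cases hk : k' = k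
    · subst hk; simp [pvLook, List.lookup]
    · have hbne : (k == k') = false := by
        simp [Ne.symm hk]
      simp [pvLook, List.lookup, hk, hbne, ih]

theorem pvIds_of_all (cs : List (List (String × String)))
    (h : ∀ c ∈ cs, (List.lookup "id" c).isSome = true) :
    pvIds cs = some (cs.map (fun c => (List.lookup "id" c).getD "")) := by
  induction cs with
  | nil => rfl
  | cons c cs' ih =>
    have hc := h c (by simp)
    rcases hid : List.lookup "id" c with _ | cid
    · rw [hid] at hc; simp at hc
    rw [pvIds, pvLook_eq_lookup, hid]
    rw [ih fun c hc => h c (by simp [hc])]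
    simp [hid]

-- unfold a true pvOk at depth d+1 into its node data
theorem pvOk_elim (t : List (String × List (String × List (List (String × String)))))
    (d : Nat) (x : String) (h : pvOk t (d + 1) x = true) :
    ∃ v cs cids, pvLook t x = some v ∧ pvLook v "childs" = some cs ∧
      pvIds cs = some cids ∧ ∀ cid ∈ cids, pvOk t d cid = true := by
  rw [pvOk] at h
  rcases hv : List.lookup x t with _ | v
  · rw [hv] at h; simp at h
  rw [hv] at h
  dsimp only at h
  rcases hcs : List.lookup "childs" v with _ | cs
  · rw [hcs] at h; simp at h
  rw [hcs] at h
  dsimp only at h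
  simp only [List.all_eq_true, Bool.and_eq_true] at h
  refine ⟨v, cs, cs.map (fun c => (List.lookup "id" c).getD ""),
    by rw [pvLook_eq_lookup]; exact hv, by rw [pvLook_eq_lookup]; exact hcs,
    pvIds_of_all cs (fun c hc => (h c hc).1), ?_⟩
  intro cid hcid
  obtain ⟨c, hc, rfl⟩ := List.mem_map.mp hcid
  exact (h c hc).2

-- pvLeaves is stable once the fuel covers the recursion depth
theorem pvLeaves_stable (t : List (String × List (String × List (List (String × String))))) :
    ∀ d x d', pvOk t d x = true → d ≤ d' → pvLeaves t d' x = pvLeaves t d x := by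
  intro d
  induction d with
  | zero => intro x d' h _; simp [pvOk] at h
  | succ d ih =>
    intro x d' h hle
    obtain ⟨d'', rfl⟩ : ∃ k, d' = k + 1 := ⟨d' - 1, by omega⟩
    obtain ⟨v, cs, cids, hlk, hcs, hids, hok⟩ := pvOk_elim t d x h
    rw [pvLeaves, pvLeaves]
    simp only [hlk, hcs, hids]
    by_cases hempty : cs = []
    · rw [if_pos hempty, if_pos hempty]
    · rw [if_neg hempty, if_neg hempty]
      refine List.flatMap_congr ?_
      intro cid hcid
      exact ih cid d'' (hok cid hcid) (by omega)

-- node unfolding of pvLeaves at the full fuel N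
theorem pvOk_children (t : List (String × List (String × List (List (String × String)))))
    (d N : Nat) (x : String) (hdN : d + 1 ≤ N) (h : pvOk t (d + 1) x = true) :
    ∃ v cs cids, pvLook t x = some v ∧ pvLook v "childs" = some cs ∧
      pvIds cs = some cids ∧ (∀ cid ∈ cids, pvOk t d cid = true) ∧
      pvLeaves t N x = if cs = [] then [x] else cids.flatMap (fun cid => pvLeaves t N cid) := by
  obtain ⟨v, cs, cids, hlk, hcs, hids, hok⟩ := pvOk_elim t d x h
  refine ⟨v, cs, cids, hlk, hcs, hids, hok, ?_⟩
  rw [pvLeaves_stable t (d + 1) x N h hdN, pvLeaves]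
  simp only [hlk, hcs, hids]
  by_cases hempty : cs = []
  · rw [if_pos hempty, if_pos hempty]
  · rw [if_neg hempty, if_neg hempty]
    refine List.flatMap_congr ?_
    intro cid hcid
    exact (pvLeaves_stable t d cid N (hok cid hcid) (by omega)).symm

theorem pvIds_length (cs : List (List (String × String))) (cids : List String)
    (h : pvIds cs = some cids) : cids.length = cs.length := by
  induction cs generalizing cids with
  | nil => simp [pvIds] at h; simp [← h]
  | cons c cs' ih =>
    rw [pvIds] at h
    rcases hid : pvLook c "id" with _ | cid
    · rw [hid] at h; simp at h
    rw [hid] at h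
    rcases hrec : pvIds cs' with _ | cids'
    · rw [hrec] at h; simp at h
    rw [hrec] at h
    simp at h
    simp [← h, ih cids' hrec]

-- ===== port A computes the spec =====
theorem pvGoA_spec (t : List (String × List (String × List (List (String × String)))))
    (N : Nat) :
    ∀ D, D ≤ N → ∀ xs, (∀ x ∈ xs, pvOk t D x = true) → ∀ fuel, D ≤ fuel →
      pvGoA t fuel xs = some (xs.flatMap (fun x => pvLeaves t N x)) := by
  intro D
  induction D with
  | zero =>
    intro _ xs hxs fuel _
    cases xs with
    | nil => rw [pvGoA]; simp
    | cons x xs' =>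
      exfalso
      have := hxs x (by simp)
      simp [pvOk] at this
  | succ d ihd =>
    intro hDN xs
    induction xs with
    | nil => intro _ fuel _; rw [pvGoA]; simp
    | cons x xs' ihxs =>
      intro hxs fuel hfuel
      obtain ⟨v, cs, cids, hlk, hcs, hids, hok, hleaf⟩ :=
        pvOk_children t d N x hDN (hxs x (by simp))
      have htail : pvGoA t fuel xs' = some (xs'.flatMap (fun x => pvLeaves t N x)) :=
        ihxs (fun y hy => hxs y (by simp [hy])) fuel hfuel
      by_cases hempty : cs = []
      · rw [pvGoA]
        simp only [hlk, hcs, if_pos hempty, htail]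
        simp [List.flatMap_cons, hleaf, hempty]
      · obtain ⟨fuel', rfl⟩ : ∃ f, fuel = f + 1 := ⟨fuel - 1, by omega⟩
        have hchild : pvGoA t fuel' cids = some (cids.flatMap (fun x => pvLeaves t N x)) :=
          ihd (by omega) cids (fun cid hcid => hok cid hcid) fuel' (by omega)
        rw [pvGoA]
        simp only [hlk, hcs, if_neg hempty, hids, hchild, htail]
        simp [List.flatMap_cons, hleaf, hempty]

-- ===== port B computes the spec =====
theorem pvGoB_mono (t : List (String × List (String × List (List (String × String))))) :
    ∀ m m' ws acc r, m ≤ m' → pvGoB t m ws acc = some r → pvGoB t m' ws acc = some r := by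
  intro m
  induction m with
  | zero => intro m' ws acc r _ h; rw [pvGoB] at h; exact absurd h (by simp)
  | succ m ih =>
    intro m' ws acc r hle h
    obtain ⟨m'', rfl⟩ : ∃ k, m' = k + 1 := ⟨m' - 1, by omega⟩
    cases ws with
    | nil => rw [pvGoB] at h ⊢; exact h
    | cons x rest =>
      rw [pvGoB] at h ⊢
      rcases hlk : pvLook t x with _ | v
      · simp [hlk] at h
      simp only [hlk] at h ⊢
      rcases hcs : pvLook v "childs" with _ | cs
      · simp [hcs] at h
      simp only [hcs] at h ⊢
      split_ifs at h ⊢ with hempty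
      · exact ih m'' rest (acc ++ [x]) r (by omega) h
      · rcases hids : pvIds cs with _ | cids
        · simp [hids] at h
        simp only [hids] at h ⊢
        exact ih m'' (cids ++ rest) acc r (by omega) h

theorem pvOne_le_pow (a n : Nat) : 1 ≤ (a + 1) ^ n :=
  Nat.one_le_pow _ _ (by omega)

theorem pvLook_mem {α : Type} (l : List (String × α)) (k : String) (v : α)
    (h : pvLook l k = some v) : (k, v) ∈ l := by
  induction l with
  | nil => simp [pvLook] at h
  | cons e rest ih =>
    obtain ⟨k', v'⟩ := e
    rw [pvLook] at h
    split_ifs at h with hk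
    · subst hk
      simp at h
      simp [h]
    · exact List.mem_cons_of_mem _ (ih h)

theorem pvBranch_le (t : List (String × List (String × List (List (String × String)))))
    (x : String) (v : List (String × List (List (String × String))))
    (cs : List (List (String × String)))
    (hlk : pvLook t x = some v) (hcs : pvLook v "childs" = some cs) :
    cs.length ≤ pvW t := by
  have hmem : (x, v) ∈ t := pvLook_mem t x v hlk
  have : ((pvLook v "childs").getD []).length ∈
      t.map (fun e => ((pvLook e.2 "childs").getD []).length) :=
    List.mem_map_of_mem (f := fun e => ((pvLook e.2 "childs").getD []).length) hmem
  have hle := List.single_le_sum (l := t.map (fun e => ((pvLook e.2 "childs").getD []).length))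
    (by intro y _; omega) _ this
  rw [hcs] at hle
  simpa [pvW] using hle

theorem pvGoB_spec (t : List (String × List (String × List (List (String × String)))))
    (N : Nat) :
    ∀ D, D ≤ N → ∀ xs, (∀ x ∈ xs, pvOk t D x = true) → ∀ ws acc out m,
      pvGoB t m ws (acc ++ xs.flatMap (fun x => pvLeaves t N x)) = some out →
      pvGoB t (m + xs.length * (pvW t + 1) ^ (D + 1)) (xs ++ ws) acc = some out := by
  intro D
  induction D with
  | zero =>
    intro _ xs hxs ws acc out m h
    cases xs with
    | nil => simpa using h
    | cons x xs' =>
      exfalso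
      have := hxs x (by simp)
      simp [pvOk] at this
  | succ d ihd =>
    intro hDN xs
    induction xs with
    | nil => intro _ ws acc out m h; simpa using h
    | cons x xs' ihxs =>
      intro hxs ws acc out m h
      obtain ⟨v, cs, cids, hlk, hcs, hids, hok, hleaf⟩ :=
        pvOk_children t d N x hDN (hxs x (by simp))
      have hm1 : 1 ≤ m := by
        by_contra hlt
        have : m = 0 := by omega
        subst this
        rw [pvGoB] at h
        simp at h
      set P := pvW t + 1 with hP
      have hPpos : 1 ≤ P ^ (d + 1 + 1) := pvOne_le_pow _ _
      have hPpos' : 1 ≤ P ^ (d + 1) := pvOne_le_pow _ _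
      obtain ⟨M', hM'⟩ : ∃ M', m + (x :: xs').length * P ^ (d + 1 + 1) = M' + 1 :=
        ⟨m + (x :: xs').length * P ^ (d + 1 + 1) - 1, by simp; omega⟩
      rw [hM', List.cons_append]
      rw [pvGoB]
      simp only [hlk, hcs]
      by_cases hempty : cs = []
      · rw [if_pos hempty]
        have hx : pvLeaves t N x = [x] := by rw [hleaf, if_pos hempty]
        have h' : pvGoB t m ws ((acc ++ [x]) ++ xs'.flatMap (fun x => pvLeaves t N x)) = some out := by
          simpa [hx, List.append_assoc] using h
        have := ihxs (fun y hy => hxs y (by simp [hy])) ws (acc ++ [x]) out m h'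
        have hexp : (xs'.length + 1) * P ^ (d + 1 + 1) =
            xs'.length * P ^ (d + 1 + 1) + P ^ (d + 1 + 1) := by ring
        simp only [List.length_cons] at hM'
        rw [hexp] at hM'
        exact pvGoB_mono t _ M' _ _ _ (by omega) this
      · simp only [if_neg hempty, hids]
        have hx : pvLeaves t N x = cids.flatMap (fun cid => pvLeaves t N cid) := by
          rw [hleaf, if_neg hempty]
        have h' : pvGoB t m ws ((acc ++ cids.flatMap (fun cid => pvLeaves t N cid)) ++
            xs'.flatMap (fun x => pvLeaves t N x)) = some out := by
          simpa [hx, List.append_assoc] using h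
        have htail := ihxs (fun y hy => hxs y (by simp [hy])) ws
          (acc ++ cids.flatMap (fun cid => pvLeaves t N cid)) out m h'
        have hchild := ihd (by omega) cids (fun cid hcid => hok cid hcid)
          (xs' ++ ws) acc out (m + xs'.length * P ^ (d + 1 + 1)) htail
        have hclen : cids.length ≤ pvW t := by
          rw [pvIds_length cs cids hids]
          exact pvBranch_le t x v cs hlk hcs
        refine pvGoB_mono t _ M' _ _ _ ?_ (by simpa [List.append_assoc] using hchild)
        have hstep : cids.length * P ^ (d + 1) + 1 ≤ P ^ (d + 1 + 1) := by
          have h1 : cids.length * P ^ (d + 1) ≤ (pvW t) * P ^ (d + 1) :=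
            Nat.mul_le_mul_right _ hclen
          have h2 : pvW t * P ^ (d + 1) + P ^ (d + 1) = P ^ (d + 1 + 1) := by
            rw [pow_succ]; ring
          omega
        have hexp : (xs'.length + 1) * P ^ (d + 1 + 1) =
            xs'.length * P ^ (d + 1 + 1) + P ^ (d + 1 + 1) := by ring
        simp only [List.length_cons] at hM'
        rw [hexp] at hM'
        omega

-- ===== assembling the equivalence =====
theorem pvGoA_entry (cat_ids : List String)
    (t : List (String × List (String × List (List (String × String)))))
    (hok : ∀ x ∈ cat_ids, pvOk t t.length x = true) :
    get_child_category_ids cat_ids t = cat_ids.flatMap (fun x => pvLeaves t t.length x) := by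
  unfold get_child_category_ids
  rw [pvGoA_spec t t.length t.length (le_refl _) cat_ids hok t.length (le_refl _)]
  rfl

theorem pvGoB_entry (cat_ids : List String)
    (t : List (String × List (String × List (List (String × String)))))
    (hok : ∀ x ∈ cat_ids, pvOk t t.length x = true) :
    get_child_category_ids_alt cat_ids t = cat_ids.flatMap (fun x => pvLeaves t t.length x) := by
  unfold get_child_category_ids_alt
  have hbase : pvGoB t 1 [] ([] ++ cat_ids.flatMap (fun x => pvLeaves t t.length x)) =
      some (cat_ids.flatMap (fun x => pvLeaves t t.length x)) := by
    rw [pvGoB]; simp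
  have := pvGoB_spec t t.length t.length (le_refl _) cat_ids hok [] [] _ 1 hbase
  rw [show cat_ids.length * (pvW t + 1) ^ (t.length + 1) + 1 =
      1 + cat_ids.length * (pvW t + 1) ^ (t.length + 1) by omega]
  simp only [List.append_nil] at this
  rw [this]
  rfl

-- ===== VERDICT (by name: the statement is the Claim_ definition above) =====
theorem get_child_category_ids_spec : Claim_equal_get_child_category_ids := by
  intro cat_ids t _ hpre
  unfold Spec_get_child_category_ids
  rw [pvGoA_entry cat_ids t hpre, pvGoB_entry cat_ids t hpre]
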